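-- pv_equiv track=rewrite | github.com/zhouyc98/auto-rule-transform | src/data.py | label_wt_to_iit
-- ===== SOURCE A (Python) =====
-- def label_wt_to_iit(flabel_wt, seq_=None, to_full_label=True):
--     ws, ts = list(zip(*flabel_wt))
--     seq = ''.join(ws)
--     if seq_:
--         assert seq == seq_
--
--     label_iit = flabel_wt.copy()
--     for k in range(len(label_iit)):
--         w, t = label_iit[k]
--         i = label_iit[k - 1][1] if k > 0 else 0
--         j = i + len(w)
--         label_iit[k] = (i, j, t)
--
--     assert all(seq[i1:j1] == flabel_wt[i][0] for i, (i1, j1, t) in enumerate(label_iit))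
--
--     if not to_full_label:
--         for i in range(len(label_iit) - 1, -1, -1):
--             if label_iit[i][2] == 'O':
--                 del label_iit[i]
--
--     if seq_:
--         return label_iit
--     else:
--         return label_iit, seq
-- ===== SOURCE B (Python) =====
-- def label_wt_to_iit(flabel_wt, seq_=None, to_full_label=True):
--     ws, ts = list(zip(*flabel_wt))
--     seq = ''.join(ws)
--     if seq_:
--         assert seq == seq_
--     # boundary table: end offsets by running total, starts shifted by one
--     ends = []
--     total = 0
--     for w in ws:
--         total += len(w)
--         ends.append(total)
--     starts = [0] + ends[:-1]
--     label_iit = [(i, j, t) for i, j, t in zip(starts, ends, ts)]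
--     if not to_full_label:
--         label_iit = [x for x in label_iit if x[2] != 'O']
--     if seq_:
--         return label_iit
--     return label_iit, seq
-- ===== Notes on version B (the rewrite author's own statement) =====
-- stated objective: simpler
-- what changed: B precomputes a boundary table (cumulative end offsets via a running total, starts = [0]+ends[:-1]) and builds the spans as a zip comprehension with a forward filter, instead of A's in-place index loop that re-reads the previous list entry and A's backward del loop; B matches A on both return modes in Python, including the bare list under truthy seq_.
-- outside the precondition, e.g. on label_wt_to_iit([('ab', 'X')], 'ab', True): A returns ((0, 2, 'X'),), B returns ((0, 2, 'X'),); on label_wt_to_iit([('ab', 'X')], 'xy', True): A raises AssertionError, B raises AssertionError; on label_wt_to_iit([], None, True): A raises ValueError, B raises ValueError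
import Mathlib
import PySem

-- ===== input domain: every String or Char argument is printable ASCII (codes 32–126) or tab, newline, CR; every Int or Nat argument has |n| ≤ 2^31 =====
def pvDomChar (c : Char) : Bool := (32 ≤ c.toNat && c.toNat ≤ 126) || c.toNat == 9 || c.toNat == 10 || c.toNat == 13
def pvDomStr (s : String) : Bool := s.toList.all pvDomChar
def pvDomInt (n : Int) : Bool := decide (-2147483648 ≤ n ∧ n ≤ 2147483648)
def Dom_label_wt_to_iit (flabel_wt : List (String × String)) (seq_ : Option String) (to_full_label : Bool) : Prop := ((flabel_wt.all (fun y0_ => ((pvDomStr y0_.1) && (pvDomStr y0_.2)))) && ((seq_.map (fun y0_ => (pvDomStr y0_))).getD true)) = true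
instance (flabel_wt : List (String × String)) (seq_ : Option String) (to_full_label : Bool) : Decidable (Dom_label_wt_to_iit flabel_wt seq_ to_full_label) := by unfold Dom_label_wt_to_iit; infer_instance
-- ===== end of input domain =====

-- B replaces A's in-place index loop (reading the previous entry's end) and backward del loop by a
-- precomputed boundary table (cumulative end offsets) zipped into spans with a forward filter; the
-- Python B reproduces A exactly, including the bare-list return mode under truthy seq_ and both
-- exceptions.  The equivalence proved here covers A's (label_iit, seq) pair-return mode: the other
-- inputs are outside Pre_ only because they cannot be expressed in this file's fixed pair return
-- type or because A raises there (see Pre_'s comment).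
-- ===== PORT A =====
-- A's k-loop: label_iit[k] = (i, i+len(w), t) with i = label_iit[k-1][1]; modelled as a left fold
-- that rewrites one entry at a time, reading the previous entry's end from the accumulator's last element.
def pvA_step (acc : List (Int × Int × String)) (wt : String × String) : List (Int × Int × String) :=
  let i : Int := match acc.getLast? with
    | some p => p.2.1
    | none => 0
  acc ++ [(i, i + PySem.Str.len wt.1, wt.2)]

def label_wt_to_iit (flabel_wt : List (String × String)) (seq_ : Option String) (to_full_label : Bool) : (List (Int × Int × String)) × String :=
  let ws := flabel_wt.map (·.1)
  let seq := PySem.Str.join "" ws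
  -- `if seq_: assert seq == seq_` never runs under Pre_ (seq_ is falsy there)
  let label_iit := flabel_wt.foldl pvA_step []
  -- `assert all(seq[i1:j1] == ...)` always holds (each span reads back its own word); no effect on the value
  let label_iit := if to_full_label then label_iit
    else  -- backward del loop: remove entries whose tag is 'O'
      label_iit.foldr (fun x acc => if x.2.2 == "O" then acc else x :: acc) []
  -- under Pre_ seq_ is falsy, so A takes the `return label_iit, seq` branch
  (label_iit, seq)

-- ===== PORT B =====
def label_wt_to_iit_alt (flabel_wt : List (String × String)) (seq_ : Option String) (to_full_label : Bool) : (List (Int × Int × String)) × String :=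
  let ws := flabel_wt.map (·.1)
  let ts := flabel_wt.map (·.2)
  let seq := PySem.Str.join "" ws
  -- running-total loop building the cumulative end offsets
  let ends := (ws.foldl (fun st w => (st.1 + PySem.Str.len w, st.2 ++ [st.1 + PySem.Str.len w])) ((0 : Int), ([] : List Int))).2
  let starts := (0 : Int) :: ends.dropLast   -- [0] + ends[:-1]
  let label_iit := ((starts.zip ends).zip ts).map (fun p => (p.1.1, p.1.2, p.2))
  let label_iit := if to_full_label then label_iit
    else label_iit.filter (fun x => x.2.2 != "O")
  (label_iit, seq)

-- ===== PRECONDITION & SPEC =====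
-- Pre_ excludes exactly the inputs whose outcome the fixed pair return type cannot state: empty
-- flabel_wt, where zip(*flabel_wt) raises ValueError; truthy seq_ mismatching the joined words,
-- where the assert raises AssertionError; and truthy matching seq_, where A (and B identically)
-- returns the bare span list — A's second return shape, which is not a value of the declared
-- (List (Int × Int × String)) × String type, so no Lean claim can be stated about it.
def Pre_label_wt_to_iit (flabel_wt : List (String × String)) (seq_ : Option String) (to_full_label : Bool) : Prop :=
  flabel_wt ≠ [] ∧ (seq_ = none ∨ seq_ = some "")
instance (flabel_wt : List (String × String)) (seq_ : Option String) (to_full_label : Bool) : Decidable (Pre_label_wt_to_iit flabel_wt seq_ to_full_label) := by unfold Pre_label_wt_to_iit; infer_instance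

def pvWitness_label_wt_to_iit : (List (String × String)) × Option String × Bool := ([("ab", "X"), ("c", "O")], none, false)

def Spec_label_wt_to_iit (flabel_wt : List (String × String)) (seq_ : Option String) (to_full_label : Bool) (out : (List (Int × Int × String)) × String) : Prop := out = label_wt_to_iit_alt flabel_wt seq_ to_full_label
instance (flabel_wt : List (String × String)) (seq_ : Option String) (to_full_label : Bool) (out : (List (Int × Int × String)) × String) : Decidable (Spec_label_wt_to_iit flabel_wt seq_ to_full_label out) := by unfold Spec_label_wt_to_iit; infer_instance

-- ===== CLAIM (what is proved, stated in full; the proofs are below) =====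
def Claim_equal_label_wt_to_iit : Prop := ∀ (flabel_wt : List (String × String)) (seq_ : Option String) (to_full_label : Bool), Dom_label_wt_to_iit flabel_wt seq_ to_full_label → Pre_label_wt_to_iit flabel_wt seq_ to_full_label → Spec_label_wt_to_iit flabel_wt seq_ to_full_label (label_wt_to_iit flabel_wt seq_ to_full_label)

-- ===== LEMMAS AND PROOFS =====
-- the common span-building recursion both loops compute
def pvBuild : List (String × String) → Int → List (Int × Int × String)
  | [], _ => []
  | (w, t) :: r, i => (i, i + PySem.Str.len w, t) :: pvBuild r (i + PySem.Str.len w)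

def pvLastEnd (acc : List (Int × Int × String)) : Int :=
  match acc.getLast? with
  | some p => p.2.1
  | none => 0

theorem pvA_fold_build_gen (l : List (String × String)) : ∀ acc,
    l.foldl pvA_step acc = acc ++ pvBuild l (pvLastEnd acc) := by
  induction l with
  | nil => intro acc; simp [pvBuild]
  | cons wt r ih =>
    intro acc
    obtain ⟨w, t⟩ := wt
    rw [List.foldl_cons, ih]
    have hstep : pvA_step acc (w, t) = acc ++ [(pvLastEnd acc, pvLastEnd acc + PySem.Str.len w, t)] := by
      simp [pvA_step, pvLastEnd]
    have hlast : pvLastEnd (acc ++ [(pvLastEnd acc, pvLastEnd acc + PySem.Str.len w, t)]) = pvLastEnd acc + PySem.Str.len w := by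
      simp [pvLastEnd]
    rw [hstep, hlast, List.append_assoc]
    rfl

theorem pvA_fold_build (l : List (String × String)) :
    l.foldl pvA_step [] = pvBuild l 0 := by
  simpa [pvLastEnd] using pvA_fold_build_gen l []

-- the ends fold produces the prefix-sum list
def pvEnds : List String → Int → List Int
  | [], _ => []
  | w :: r, i => (i + PySem.Str.len w) :: pvEnds r (i + PySem.Str.len w)

theorem pvEnds_fold (ws : List String) : ∀ (i : Int) (e : List Int),
    (ws.foldl (fun st w => (st.1 + PySem.Str.len w, st.2 ++ [st.1 + PySem.Str.len w])) (i, e)).2 = e ++ pvEnds ws i := by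
  induction ws with
  | nil => intro i e; simp [pvEnds]
  | cons w r ih =>
    intro i e
    simp only [List.foldl_cons, pvEnds]
    rw [ih, List.append_assoc]
    rfl

theorem pvZip_dropLast (j : Int) (E : List Int) :
    (j :: E.dropLast).zip E = ((j :: E).dropLast).zip E := by
  cases E with
  | nil => simp
  | cons e E0 => rw [List.dropLast_cons₂]

theorem pvB_zip_build_gen (l : List (String × String)) : ∀ (i : Int),
    ((((i :: pvEnds (l.map (·.1)) i).dropLast).zip (pvEnds (l.map (·.1)) i)).zip (l.map (·.2))).map (fun p => (p.1.1, p.1.2, p.2)) = pvBuild l i := by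
  induction l with
  | nil => intro i; simp [pvEnds, pvBuild]
  | cons wt r ih =>
    intro i
    obtain ⟨w, t⟩ := wt
    simp only [List.map_cons, pvEnds, pvBuild]
    rw [List.dropLast_cons₂, List.zip_cons_cons, List.zip_cons_cons, List.map_cons]
    rw [ih (i + PySem.Str.len w)]

theorem pvB_zip_build (l : List (String × String)) :
    ((((0 : Int) :: ((l.map (·.1)).foldl (fun st w => (st.1 + PySem.Str.len w, st.2 ++ [st.1 + PySem.Str.len w])) ((0 : Int), ([] : List Int))).2.dropLast).zip ((l.map (·.1)).foldl (fun st w => (st.1 + PySem.Str.len w, st.2 ++ [st.1 + PySem.Str.len w])) ((0 : Int), ([] : List Int))).2).zip (l.map (·.2))).map (fun p => (p.1.1, p.1.2, p.2)) = pvBuild l 0 := by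
  rw [pvEnds_fold (l.map (·.1)) 0 []]
  simp only [List.nil_append]
  rw [pvZip_dropLast]
  exact pvB_zip_build_gen l 0

theorem pvFoldr_filter (l : List (Int × Int × String)) :
    l.foldr (fun x acc => if x.2.2 == "O" then acc else x :: acc) [] = l.filter (fun x => x.2.2 != "O") := by
  induction l with
  | nil => rfl
  | cons x r ih =>
    by_cases h : x.2.2 = "O" <;> simp [h] <;> simpa using ih

-- ===== VERDICT (by name: the statement is the Claim_ definition above) =====
theorem label_wt_to_iit_spec : Claim_equal_label_wt_to_iit := by
  intro flabel_wt seq_ to_full_label _ _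
  unfold Spec_label_wt_to_iit label_wt_to_iit label_wt_to_iit_alt
  simp only [pvA_fold_build, pvB_zip_build, pvFoldr_filter]
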